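-- pv_equiv track=rewrite | github.com/wkswilliam/challenges | CSES/Dynamic Programming/dice_combinations.py | Solution
-- ===== SOURCE A (Python) =====
-- def Solution(n):
--     arr = [0]*(n+1)
--
--     for i in range(0,n+1):
--     	if i == 0:
--     		arr[0] = 1
--
--     	elif i<6:
--     		for j in range(0,i):
--     			arr[i]+=arr[j]
--
--     	else:
--     		arr[i] = (arr[i-1]+arr[i-2]+arr[i-3]+arr[i-4]+arr[i-5]+arr[i-6])%(10**9+7)
--
--     return arr[n]%(10**9+7)
-- ===== SOURCE B (Python) =====
-- MOD = 10**9 + 7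
--
-- def _mat_mult(X, Y):
--     return [[sum(X[i][k] * Y[k][j] for k in range(6)) % MOD for j in range(6)]
--             for i in range(6)]
--
-- def _mat_pow(M, e):
--     R = [[1 if i == j else 0 for j in range(6)] for i in range(6)]
--     while e > 0:
--         if e % 2 == 1:
--             R = _mat_mult(R, M)
--         M = _mat_mult(M, M)
--         e //= 2
--     return R
--
-- def Solution(n):
--     C = [[1, 1, 1, 1, 1, 1],
--          [1, 0, 0, 0, 0, 0],
--          [0, 1, 0, 0, 0, 0],
--          [0, 0, 1, 0, 0, 0],
--          [0, 0, 0, 1, 0, 0],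
--          [0, 0, 0, 0, 1, 0]]
--     P = _mat_pow(C, n)
--     return P[0][0]
-- ===== Notes on version B (the rewrite author's own statement) =====
-- stated objective: faster
-- what changed: Replaces the O(n) bottom-up DP array with binary exponentiation of the order-6 companion matrix modulo 1e9+7, reading the count off entry (0,0) of the matrix power.
import Mathlib
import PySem

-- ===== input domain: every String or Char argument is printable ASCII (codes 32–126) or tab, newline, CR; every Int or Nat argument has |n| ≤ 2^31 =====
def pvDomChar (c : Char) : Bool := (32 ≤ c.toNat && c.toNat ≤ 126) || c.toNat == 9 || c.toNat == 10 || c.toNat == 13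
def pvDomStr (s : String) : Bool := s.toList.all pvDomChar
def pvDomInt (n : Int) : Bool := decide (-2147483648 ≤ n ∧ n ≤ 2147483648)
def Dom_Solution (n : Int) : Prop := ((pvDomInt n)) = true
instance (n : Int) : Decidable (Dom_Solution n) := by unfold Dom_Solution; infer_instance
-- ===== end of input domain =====

-- B replaces the O(n) DP array with O(log n) binary exponentiation of the order-6
-- companion matrix mod 1e9+7 (objective: faster, asymptotic).

-- ===== PORT A =====
-- one iteration of A's "for i in range(0, n+1)" loop body
def solStep (arr : List Int) (i : Nat) : List Int :=
  if i = 0 then arr.set 0 1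
  else if i < 6 then
    -- "for j in range(0, i): arr[i] += arr[j]"
    arr.set i ((List.range i).foldl (fun acc j => acc + arr.getD j 0) (arr.getD i 0))
  else
    arr.set i (PySem.Int.mod (arr.getD (i-1) 0 + arr.getD (i-2) 0 + arr.getD (i-3) 0
      + arr.getD (i-4) 0 + arr.getD (i-5) 0 + arr.getD (i-6) 0) 1000000007)

def Solution (n : Int) : Int :=
  -- arr = [0]*(n+1); Python gives [] when n+1 ≤ 0, matched by .toNat clamping
  let N := (n + 1).toNat
  let arr := (List.range N).foldl solStep (List.replicate N 0)
  -- "return arr[n] % (10**9+7)": arr[n] raises IndexError for n < 0 (excluded by Pre_);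
  -- for 0 ≤ n the index n.toNat is in range, so getD is exact
  PySem.Int.mod (arr.getD n.toNat 0) 1000000007

-- ===== PORT B =====
-- 6×6 matrices as lists of rows; entries reduced mod 1e9+7 (Source B's _mat_mult)
def matMult (X Y : List (List Int)) : List (List Int) :=
  (List.range 6).map (fun i => (List.range 6).map (fun j =>
    PySem.Int.mod ((List.range 6).foldl
      (fun acc k => acc + (X.getD i []).getD k 0 * (Y.getD k []).getD j 0) 0) 1000000007))

-- Source B's _mat_pow while-loop
def matPowLoop (R M : List (List Int)) (e : Nat) : List (List Int) :=
  if e = 0 then R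
  else matPowLoop (if e % 2 = 1 then matMult R M else R) (matMult M M) (e / 2)
  termination_by e
  decreasing_by omega

def idMat : List (List Int) :=
  (List.range 6).map (fun i => (List.range 6).map (fun j => if i = j then (1:Int) else 0))

def compMat : List (List Int) :=
  [[1,1,1,1,1,1],[1,0,0,0,0,0],[0,1,0,0,0,0],[0,0,1,0,0,0],[0,0,0,1,0,0],[0,0,0,0,1,0]]

def Solution_alt (n : Int) : Int :=
  -- "while e > 0": never runs for n ≤ 0, matched by .toNat
  let P := matPowLoop idMat compMat n.toNat
  (P.getD 0 []).getD 0 0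

-- ===== PRECONDITION & SPEC =====
-- A raises IndexError ("arr[n]" on the empty/short list) for n < 0; Pre_ excludes exactly those
def Pre_Solution (n : Int) : Prop := 0 ≤ n
instance (n : Int) : Decidable (Pre_Solution n) := by unfold Pre_Solution; infer_instance
def pvWitness_Solution : Int := 7

def Spec_Solution (n : Int) (out : Int) : Prop := out = Solution_alt n
instance (n : Int) (out : Int) : Decidable (Spec_Solution n out) := by unfold Spec_Solution; infer_instance

-- ===== CLAIM (what is proved, stated in full; the proofs are below) =====
def Claim_equal_Solution : Prop := ∀ (n : Int), Dom_Solution n → Pre_Solution n → Spec_Solution n (Solution n)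

-- ===== LEMMAS AND PROOFS =====

-- the dice-count sequence mod 1e9+7 (reference for both proofs)
def F : Nat → Int
  | 0 => 1
  | 1 => PySem.Int.mod (F 0) 1000000007
  | 2 => PySem.Int.mod (F 1 + F 0) 1000000007
  | 3 => PySem.Int.mod (F 2 + F 1 + F 0) 1000000007
  | 4 => PySem.Int.mod (F 3 + F 2 + F 1 + F 0) 1000000007
  | 5 => PySem.Int.mod (F 4 + F 3 + F 2 + F 1 + F 0) 1000000007
  | (n+6) => PySem.Int.mod (F (n+5) + F (n+4) + F (n+3) + F (n+2) + F (n+1) + F n) 1000000007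

lemma F_bounds (n : Nat) : 0 ≤ F n ∧ F n < 1000000007 := by
  match n with
  | 0 | 1 | 2 | 3 | 4 | 5 => decide
  | (k+6) =>
    exact ⟨PySem.Int.mod_nonneg _ (by norm_num), PySem.Int.mod_lt _ (by norm_num)⟩

-- the recurrence with zero padding below index 0, in the uniform one-step form
lemma F_succ (n : Nat) : F (n+1) = PySem.Int.mod (F n
    + (if 1 ≤ n then F (n-1) else 0) + (if 2 ≤ n then F (n-2) else 0)
    + (if 3 ≤ n then F (n-3) else 0) + (if 4 ≤ n then F (n-4) else 0)
    + (if 5 ≤ n then F (n-5) else 0)) 1000000007 := by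
  match n with
  | 0 | 1 | 2 | 3 | 4 => decide
  | (k+5) =>
    rw [if_pos (by omega), if_pos (by omega), if_pos (by omega), if_pos (by omega),
        if_pos (by omega)]
    rfl

lemma getD_set (l : List Int) (k : Nat) (v : Int) (i : Nat) :
    (l.set k v).getD i 0 = if i = k ∧ k < l.length then v else l.getD i 0 := by
  simp only [List.getD, List.getElem?_set]
  split_ifs with h1 h2 h3 h4 <;> try rfl
  all_goals simp_all

-- ---------- A side ----------

lemma length_solStep (arr : List Int) (i : Nat) : (solStep arr i).length = arr.length := by
  unfold solStep; split_ifs <;> simp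

lemma length_fold (m N : Nat) :
    ((List.range m).foldl solStep (List.replicate N 0)).length = N := by
  induction m with
  | zero => simp
  | succ k ih => rw [List.range_succ, List.foldl_append]; simp [length_solStep, ih]

lemma arr_inv (N : Nat) : ∀ m, m ≤ N → ∀ i, i < N →
    ((List.range m).foldl solStep (List.replicate N 0)).getD i 0
      = if i < m then F i else 0 := by
  intro m
  induction m with
  | zero =>
    intro _ i hi
    simp [List.getD, hi]
  | succ m ih =>
    intro hm i hi
    rw [List.range_succ, List.foldl_append, List.foldl_cons, List.foldl_nil]
    set arr := (List.range m).foldl solStep (List.replicate N 0) with harr_def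
    have hlen : arr.length = N := length_fold m N
    have harr : ∀ j, j < N → arr.getD j 0 = if j < m then F j else 0 := ih (by omega)
    have hmN : m < N := by omega
    unfold solStep
    by_cases h0 : m = 0
    · subst h0
      rw [if_pos rfl, getD_set, hlen]
      by_cases hi0 : i = 0
      · subst hi0; rw [if_pos ⟨rfl, by omega⟩, if_pos (by omega)]; rfl
      · rw [if_neg (fun h => hi0 h.1), harr i hi, if_neg (by omega), if_neg (by omega)]
    · rw [if_neg h0]
      by_cases h6 : m < 6
      · rw [if_pos h6]
        have hstart : arr.getD m 0 = 0 := by rw [harr m hmN, if_neg (by omega)]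
        have hcong : (List.range m).foldl (fun acc j => acc + arr.getD j 0) (arr.getD m 0)
            = (List.range m).foldl (fun acc j => acc + F j) 0 := by
          rw [hstart]
          apply PySem.List.foldl_congr_mem
          intro acc x hx
          have hxm := List.mem_range.mp hx
          rw [harr x (by omega), if_pos hxm]
        rw [hcong]
        have hF : (List.range m).foldl (fun acc j => acc + F j) 0 = F m := by
          have h1m : 1 ≤ m := by omega
          interval_cases m <;> decide
        rw [hF, getD_set, hlen]
        by_cases him : i = m
        · subst him; rw [if_pos ⟨rfl, hmN⟩, if_pos (by omega)]
        · rw [if_neg (fun h => him h.1), harr i hi]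
          by_cases hlt : i < m
          · rw [if_pos hlt, if_pos (by omega)]
          · rw [if_neg hlt, if_neg (by omega)]
      · rw [if_neg h6]
        have e1 : arr.getD (m-1) 0 = F (m-1) := by rw [harr _ (by omega), if_pos (by omega)]
        have e2 : arr.getD (m-2) 0 = F (m-2) := by rw [harr _ (by omega), if_pos (by omega)]
        have e3 : arr.getD (m-3) 0 = F (m-3) := by rw [harr _ (by omega), if_pos (by omega)]
        have e4 : arr.getD (m-4) 0 = F (m-4) := by rw [harr _ (by omega), if_pos (by omega)]
        have e5 : arr.getD (m-5) 0 = F (m-5) := by rw [harr _ (by omega), if_pos (by omega)]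
        have e6 : arr.getD (m-6) 0 = F (m-6) := by rw [harr _ (by omega), if_pos (by omega)]
        rw [e1, e2, e3, e4, e5, e6]
        have hFm : PySem.Int.mod (F (m-1) + F (m-2) + F (m-3) + F (m-4) + F (m-5) + F (m-6))
            1000000007 = F m := by
          obtain ⟨k, rfl⟩ : ∃ k, m = k + 6 := ⟨m - 6, by omega⟩
          rfl
        rw [hFm, getD_set, hlen]
        by_cases him : i = m
        · subst him; rw [if_pos ⟨rfl, hmN⟩, if_pos (by omega)]
        · rw [if_neg (fun h => him h.1), harr i hi]
          by_cases hlt : i < m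
          · rw [if_pos hlt, if_pos (by omega)]
          · rw [if_neg hlt, if_neg (by omega)]

lemma Solution_eq_F (n : Int) (hn : 0 ≤ n) : Solution n = F n.toNat := by
  unfold Solution
  have ht : (n+1).toNat = n.toNat + 1 := by omega
  simp only [ht]
  rw [arr_inv (n.toNat+1) (n.toNat+1) le_rfl n.toNat (by omega), if_pos (by omega)]
  rw [PySem.Int.mod_eq_emod_of_pos (by norm_num : (0:Int) < 1000000007)]
  exact Int.emod_eq_of_lt (F_bounds n.toNat).1 (F_bounds n.toNat).2

-- ---------- B side ----------

def phi (X : List (List Int)) : Matrix (Fin 6) (Fin 6) (ZMod 1000000007) :=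
  Matrix.of fun i j => (((X.getD (i:Nat) []).getD (j:Nat) 0 : Int) : ZMod 1000000007)

lemma getD_map_range6 {α : Type} (f : Nat → α) (d : α) (i : Nat) (h : i < 6) :
    ((List.range 6).map f).getD i d = f i := by
  interval_cases i <;> rfl

lemma cast_pymod (a : Int) :
    ((PySem.Int.mod a 1000000007 : Int) : ZMod 1000000007) = (a : ZMod 1000000007) := by
  rw [PySem.Int.mod_eq_emod_of_pos (by norm_num : (0:Int) < 1000000007)]
  have h : ((1000000007 : Int)) = ((1000000007 : Nat) : Int) := by norm_num
  rw [h, ZMod.intCast_mod]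

lemma phi_mult (X Y : List (List Int)) : phi (matMult X Y) = phi X * phi Y := by
  ext i j
  show ((( (matMult X Y).getD (i:Nat) []).getD (j:Nat) 0 : Int) : ZMod 1000000007) = _
  rw [Matrix.mul_apply, Fin.sum_univ_six]
  unfold matMult
  rw [getD_map_range6 _ _ _ i.isLt, getD_map_range6 _ _ _ j.isLt]
  rw [cast_pymod]
  have hr : List.range 6 = [0,1,2,3,4,5] := by rfl
  rw [hr]
  simp only [List.foldl]
  push_cast
  simp only [phi, Matrix.of_apply]
  norm_num

lemma phi_id : phi idMat = 1 := by
  ext i j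
  show ((( idMat.getD (i:Nat) []).getD (j:Nat) 0 : Int) : ZMod 1000000007) = _
  unfold idMat
  rw [getD_map_range6 _ _ _ i.isLt, getD_map_range6 _ _ _ j.isLt]
  rw [Matrix.one_apply]
  have : ((i:Nat) = (j:Nat)) = (i = j) := by
    simp [Fin.ext_iff]
  by_cases h : i = j
  · simp [h]
  · have h2 : (i:Nat) ≠ (j:Nat) := by simpa [Fin.ext_iff] using h
    simp [h, h2]

lemma phi_pow : ∀ e R M, phi (matPowLoop R M e) = phi R * (phi M)^e := by
  intro e
  induction e using Nat.strong_induction_on with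
  | _ e ih =>
    intro R M
    unfold matPowLoop
    by_cases h0 : e = 0
    · simp [h0]
    · rw [if_neg h0, ih (e / 2) (by omega)]
      by_cases hodd : e % 2 = 1
      · rw [if_pos hodd, phi_mult, phi_mult, mul_assoc, ← sq, ← pow_mul, ← pow_succ']
        have he : 2 * (e / 2) + 1 = e := by omega
        rw [he]
      · rw [if_neg hodd, phi_mult, ← sq, ← pow_mul]
        have he : 2 * (e / 2) = e := by omega
        rw [he]

-- the state vector (F n, F (n-1), …, zero-padded below index 0)
def wv (n : Nat) : Fin 6 → ZMod 1000000007 :=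
  fun j => if (j:Nat) ≤ n then ((F (n - (j:Nat)) : Int) : ZMod 1000000007) else 0

lemma step_wv (n : Nat) : (phi compMat).mulVec (wv n) = wv (n+1) := by
  funext i
  simp only [Matrix.mulVec, dotProduct, Fin.sum_univ_six]
  fin_cases i
  · -- row 0: the recurrence
    simp only [phi, Matrix.of_apply, compMat, wv]
    norm_num [List.getD]
    rw [F_succ, cast_pymod]
    push_cast
    congr
  · -- row 1
    simp only [phi, Matrix.of_apply, compMat, wv]
    norm_num [List.getD]
  · -- row 2
    simp only [phi, Matrix.of_apply, compMat, wv]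
    norm_num [List.getD]
    by_cases h : 1 ≤ n
    · simp [h, show 2 ≤ n+1 from by omega, show n+1-2 = n-1 from by omega]
    · simp [h, show ¬(2 ≤ n+1) from by omega]
  · -- row 3
    simp only [phi, Matrix.of_apply, compMat, wv]
    norm_num [List.getD]
    by_cases h : 2 ≤ n
    · simp [h, show 3 ≤ n+1 from by omega, show n+1-3 = n-2 from by omega]
    · simp [h, show ¬(3 ≤ n+1) from by omega]
  · -- row 4
    simp only [phi, Matrix.of_apply, compMat, wv]
    norm_num [List.getD]
    by_cases h : 3 ≤ n
    · simp [h, show 4 ≤ n+1 from by omega, show n+1-4 = n-3 from by omega]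
    · simp [h, show ¬(4 ≤ n+1) from by omega]
  · -- row 5
    simp only [phi, Matrix.of_apply, compMat, wv]
    norm_num [List.getD]
    by_cases h : 4 ≤ n
    · simp [h, show 5 ≤ n+1 from by omega, show n+1-5 = n-4 from by omega]
    · simp [h, show ¬(5 ≤ n+1) from by omega]

lemma pow_wv (n : Nat) : ((phi compMat)^n).mulVec (wv 0) = wv n := by
  induction n with
  | zero => simp [Matrix.one_mulVec]
  | succ k ih =>
    rw [pow_succ', ← Matrix.mulVec_mulVec, ih, step_wv]

lemma entry00 (n : Nat) : ((phi compMat)^n) 0 0 = ((F n : Int) : ZMod 1000000007) := by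
  have h := congrFun (pow_wv n) 0
  simp only [Matrix.mulVec, dotProduct, Fin.sum_univ_six, wv] at h
  simpa [show F 0 = 1 from rfl] using h

-- entry (0,0) of any matPowLoop result starting from idMat lies in [0, 1e9+7)
def Ent (X : List (List Int)) : Prop :=
  0 ≤ (X.getD 0 []).getD 0 0 ∧ (X.getD 0 []).getD 0 0 < 1000000007

lemma ent_matMult (X Y : List (List Int)) : Ent (matMult X Y) := by
  unfold Ent matMult
  rw [getD_map_range6 _ _ 0 (by norm_num), getD_map_range6 _ _ 0 (by norm_num)]
  exact ⟨PySem.Int.mod_nonneg _ (by norm_num), PySem.Int.mod_lt _ (by norm_num)⟩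

lemma ent_loop : ∀ e R M, Ent R → Ent (matPowLoop R M e) := by
  intro e
  induction e using Nat.strong_induction_on with
  | _ e ih =>
    intro R M hR
    unfold matPowLoop
    by_cases h0 : e = 0
    · simpa [h0] using hR
    · rw [if_neg h0]
      apply ih (e/2) (by omega)
      split_ifs with h
      · exact ent_matMult _ _
      · exact hR

lemma ent_id : Ent idMat := by
  unfold Ent idMat
  rw [getD_map_range6 _ _ 0 (by norm_num), getD_map_range6 _ _ 0 (by norm_num)]
  norm_num

lemma Solution_alt_charac (n : Int) :
    (((Solution_alt n : Int)) : ZMod 1000000007) = ((F n.toNat : Int) : ZMod 1000000007)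
    ∧ 0 ≤ Solution_alt n ∧ Solution_alt n < 1000000007 := by
  have hS : Solution_alt n
      = ((matPowLoop idMat compMat n.toNat).getD 0 []).getD 0 0 := rfl
  have hent : Ent (matPowLoop idMat compMat n.toNat) := ent_loop _ _ _ ent_id
  have hphi : phi (matPowLoop idMat compMat n.toNat) = (phi compMat)^n.toNat := by
    rw [phi_pow, phi_id, one_mul]
  have hc : phi (matPowLoop idMat compMat n.toNat) 0 0
      = ((F n.toNat : Int) : ZMod 1000000007) := by rw [hphi]; exact entry00 _
  refine ⟨?_, hS ▸ hent.1, hS ▸ hent.2⟩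
  rw [hS]
  simpa [phi, Matrix.of_apply] using hc

-- ===== VERDICT (by name: the statement is the Claim_ definition above) =====
theorem Solution_spec : Claim_equal_Solution := by
  intro n _ hn
  unfold Spec_Solution
  obtain ⟨hc, hb0, hb1⟩ := Solution_alt_charac n
  obtain ⟨ha0, ha1⟩ := F_bounds n.toNat
  rw [Solution_eq_F n hn]
  have : ((F n.toNat : Int) : ZMod 1000000007) = ((Solution_alt n : Int) : ZMod 1000000007) := hc.symm
  rw [ZMod.intCast_eq_intCast_iff] at this
  have h2 : F n.toNat % 1000000007 = Solution_alt n % 1000000007 := by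
    simpa [Int.ModEq] using this
  omega
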